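-- pv_equiv track=rewrite | github.com/mitochondrion/cbh | bio.py | fuzzy_occurrences
-- ===== SOURCE A (Python) =====
-- def fuzzy_occurrences(sequence, kmer, fuzziness):
--   occurrences = []
--   k = len(kmer)
--   kmer_end_idx = k - 1
--
--   for start_idx in range(1 + len(sequence) - k):
--     differences = 0
--     for kmer_idx,base in enumerate(kmer):
--       if sequence[start_idx + kmer_idx] != base:
--         differences += 1
--       if differences > fuzziness:
--         break
--       if kmer_idx == kmer_end_idx:
--         occurrences.append(start_idx)
--
--   return occurrences
-- ===== SOURCE B (Python) =====
-- def fuzzy_occurrences(sequence, kmer, fuzziness):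
--     m = len(sequence) - len(kmer) + 1
--     mism = [0] * m
--     for j, c in enumerate(kmer):
--         mism = [d + (sequence[i + j] != c) for i, d in enumerate(mism)]
--     return [i for i in range(m) if mism[i] <= fuzziness]
-- ===== Notes on version B (the rewrite author's own statement) =====
-- stated objective: alternative
-- what changed: A scans each window left-to-right with a mismatch counter and early break; B interchanges the loops: one pass per kmer character accumulates per-window mismatch counts into an array, then a final filter keeps the windows within fuzziness.
-- intended difference: For an empty kmer with fuzziness >= 0, A returns [] (its append sits inside the per-character loop, which never runs), while B returns every position 0..len(sequence), the intended value since the empty string occurs with 0 mismatches at every position. — e.g. on fuzzy_occurrences("ab", "", 0): A returns [], B returns [0, 1, 2]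
import Mathlib
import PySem

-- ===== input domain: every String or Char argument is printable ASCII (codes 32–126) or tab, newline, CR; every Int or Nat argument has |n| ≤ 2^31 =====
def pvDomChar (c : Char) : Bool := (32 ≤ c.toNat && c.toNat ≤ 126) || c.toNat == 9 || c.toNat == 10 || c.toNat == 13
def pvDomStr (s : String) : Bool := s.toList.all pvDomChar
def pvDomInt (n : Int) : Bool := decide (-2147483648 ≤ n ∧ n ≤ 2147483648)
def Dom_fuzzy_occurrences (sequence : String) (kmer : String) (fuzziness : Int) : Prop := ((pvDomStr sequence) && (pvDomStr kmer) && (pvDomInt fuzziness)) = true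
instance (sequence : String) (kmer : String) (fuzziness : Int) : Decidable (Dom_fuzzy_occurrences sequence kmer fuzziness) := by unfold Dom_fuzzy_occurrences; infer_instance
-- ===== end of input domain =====

-- B interchanges A's loops: per kmer character it accumulates per-window mismatch counts,
-- then filters windows by fuzziness (alternative decomposition, same asymptotic cost).

-- ===== PORT A =====
-- A's inner 'for kmer_idx, base in enumerate(kmer)' loop with its 'break' and conditional append
def fuzzyInner (seq : List Char) (fuzz kend si : Int) :
    List (Int × Char) → Int → List Int → List Int
  | [], _, occ => occ
  | (j, base) :: rest, diff, occ =>
    let diff' := if PySem.List.pyGet? seq (si + j) ≠ some base then diff + 1 else diff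
    if diff' > fuzz then occ
    else fuzzyInner seq fuzz kend si rest diff' (if j == kend then occ ++ [si] else occ)

def fuzzy_occurrences (sequence : String) (kmer : String) (fuzziness : Int) : List Int :=
  let seq := sequence.toList
  let km := kmer.toList
  let k : Int := km.length
  let kmer_end_idx := k - 1
  (PySem.List.pyRange 0 (1 + (seq.length : Int) - k) 1).foldl
    (fun occurrences start_idx =>
      fuzzyInner seq fuzziness kmer_end_idx start_idx (PySem.List.enumerate km) 0 occurrences)
    []

-- ===== PORT B =====
def fuzzy_occurrences_alt (sequence : String) (kmer : String) (fuzziness : Int) : List Int :=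
  let seq := sequence.toList
  let km := kmer.toList
  let m : Int := (seq.length : Int) - (km.length : Int) + 1
  let mism := (PySem.List.enumerate km).foldl
    (fun ms jc =>
      (PySem.List.enumerate ms).map
        (fun idp => idp.2 + (if PySem.List.pyGet? seq (idp.1 + jc.1) ≠ some jc.2 then 1 else 0)))
    (List.replicate m.toNat (0 : Int))
  -- mism[i]: the index is always in range (0 ≤ i < m = len(mism)), so the total pyGetD is exact
  (PySem.List.pyRange 0 m 1).filter
    (fun i => decide (PySem.List.pyGetD mism i 0 ≤ fuzziness))

-- ===== PRECONDITION & SPEC =====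
-- For an empty kmer with fuzziness ≥ 0, A returns [] (its append sits inside the per-character
-- loop, which never runs), while B returns every position 0..len(sequence), the intended value
-- since the empty string occurs with 0 mismatches at every position.
def D_fuzzy_occurrences (sequence : String) (kmer : String) (fuzziness : Int) : Prop :=
  kmer = "" ∧ 0 ≤ fuzziness
instance (sequence : String) (kmer : String) (fuzziness : Int) : Decidable (D_fuzzy_occurrences sequence kmer fuzziness) := by unfold D_fuzzy_occurrences; infer_instance

def Spec_fuzzy_occurrences (sequence : String) (kmer : String) (fuzziness : Int) (out : List Int) : Prop := ¬ D_fuzzy_occurrences sequence kmer fuzziness → out = fuzzy_occurrences_alt sequence kmer fuzziness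
instance (sequence : String) (kmer : String) (fuzziness : Int) (out : List Int) : Decidable (Spec_fuzzy_occurrences sequence kmer fuzziness out) := by unfold Spec_fuzzy_occurrences; infer_instance

def pvDiffWitness_fuzzy_occurrences : String × String × Int := ("ab", "", 0)
def pvDiffWitnessOut_fuzzy_occurrences : (List Int) × (List Int) := ([], [0, 1, 2])

-- ===== CLAIM (what is proved, stated in full; the proofs are below) =====
def Claim_unchanged_fuzzy_occurrences : Prop := ∀ (sequence : String) (kmer : String) (fuzziness : Int), Dom_fuzzy_occurrences sequence kmer fuzziness → Spec_fuzzy_occurrences sequence kmer fuzziness (fuzzy_occurrences sequence kmer fuzziness)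
def Claim_changed_fuzzy_occurrences : Prop := Dom_fuzzy_occurrences (pvDiffWitness_fuzzy_occurrences.1) (pvDiffWitness_fuzzy_occurrences.2.1) (pvDiffWitness_fuzzy_occurrences.2.2) ∧ D_fuzzy_occurrences (pvDiffWitness_fuzzy_occurrences.1) (pvDiffWitness_fuzzy_occurrences.2.1) (pvDiffWitness_fuzzy_occurrences.2.2) ∧ fuzzy_occurrences (pvDiffWitness_fuzzy_occurrences.1) (pvDiffWitness_fuzzy_occurrences.2.1) (pvDiffWitness_fuzzy_occurrences.2.2) = pvDiffWitnessOut_fuzzy_occurrences.1 ∧ fuzzy_occurrences_alt (pvDiffWitness_fuzzy_occurrences.1) (pvDiffWitness_fuzzy_occurrences.2.1) (pvDiffWitness_fuzzy_occurrences.2.2) = pvDiffWitnessOut_fuzzy_occurrences.2 ∧ pvDiffWitnessOut_fuzzy_occurrences.1 ≠ pvDiffWitnessOut_fuzzy_occurrences.2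
def Claim_exact_fuzzy_occurrences : Prop := ∀ (sequence : String) (kmer : String) (fuzziness : Int), Dom_fuzzy_occurrences sequence kmer fuzziness → D_fuzzy_occurrences sequence kmer fuzziness → fuzzy_occurrences sequence kmer fuzziness ≠ fuzzy_occurrences_alt sequence kmer fuzziness

-- ===== LEMMAS AND PROOFS =====

-- number of mismatches of kmer suffix cs (whose first char has kmer index t) against the window at si
def misFrom (seq : List Char) (si : Int) : Int → List Char → Int
  | _, [] => 0
  | t, c :: cs => (if PySem.List.pyGet? seq (si + t) ≠ some c then 1 else 0) + misFrom seq si (t + 1) cs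

lemma misFrom_nonneg (seq : List Char) (si : Int) : ∀ (t : Int) (cs : List Char),
    0 ≤ misFrom seq si t cs := by
  intro t cs
  induction cs generalizing t with
  | nil => simp [misFrom]
  | cons c cs ih =>
    have := ih (t + 1)
    simp only [misFrom]
    split <;> omega

lemma inner_spec (seq : List Char) (fuzz si : Int) : ∀ (cs : List Char), cs ≠ [] →
    ∀ (t diff : Int) (occ : List Int),
    fuzzyInner seq fuzz (t + (cs.length : Int) - 1) si (PySem.List.enumerate cs t) diff occ =
      if diff + misFrom seq si t cs ≤ fuzz then occ ++ [si] else occ := by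
  intro cs
  induction cs with
  | nil => intro h; exact absurd rfl h
  | cons c cs ih =>
    intro _ t diff occ
    rw [PySem.List.enumerate_cons]
    simp only [fuzzyInner, misFrom]
    cases cs with
    | nil =>
      have ht : (t == t + ((List.cons c []).length : Int) - 1) = true := by
        simp only [List.length_cons, List.length_nil, beq_iff_eq]; push_cast; ring
      simp only [ht, if_true, PySem.List.enumerate_nil, fuzzyInner, misFrom]
      split_ifs <;> first | rfl | omega
    | cons c' cs' =>
      have hk : t + ((List.cons c (c' :: cs')).length : Int) - 1
          = (t + 1) + (((c' :: cs').length : Int)) - 1 := by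
        simp only [List.length_cons]; push_cast; ring
      have hne2 : (t == (t + 1) + (((c' :: cs').length : Int)) - 1) = false := by
        simp only [beq_eq_false_iff_ne, ne_eq, List.length_cons]
        push_cast; omega
      have hnn := misFrom_nonneg seq si (t + 1) (c' :: cs')
      simp only [hk, hne2, Bool.false_eq_true, if_false]
      by_cases hg : PySem.List.pyGet? seq (si + t) ≠ some c
      · simp only [if_pos hg]
        by_cases hb : diff + 1 > fuzz
        · simp only [if_pos hb]
          rw [if_neg (by omega)]
        · simp only [if_neg hb]
          rw [ih (by simp) (t + 1) (diff + 1) occ]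
          have harr : diff + 1 + misFrom seq si (t + 1) (c' :: cs')
              = diff + (1 + misFrom seq si (t + 1) (c' :: cs')) := by ring
          rw [harr]
      · simp only [if_neg hg]
        by_cases hb : diff > fuzz
        · simp only [if_pos hb]
          rw [if_neg (by omega)]
        · simp only [if_neg hb]
          rw [ih (by simp) (t + 1) diff occ]
          have harr : diff + misFrom seq si (t + 1) (c' :: cs')
              = diff + (0 + misFrom seq si (t + 1) (c' :: cs')) := by ring
          rw [harr]

lemma A_char (seq km : List Char) (fuzz : Int) (h : km ≠ []) :
    (PySem.List.pyRange 0 (1 + (seq.length : Int) - (km.length : Int)) 1).foldl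
      (fun occ si => fuzzyInner seq fuzz ((km.length : Int) - 1) si (PySem.List.enumerate km) 0 occ) []
    = (PySem.List.pyRange 0 (1 + (seq.length : Int) - (km.length : Int)) 1).filter
        (fun si => decide (misFrom seq si 0 km ≤ fuzz)) := by
  have hcong : ∀ (occ : List Int) (si : Int),
      fuzzyInner seq fuzz ((km.length : Int) - 1) si (PySem.List.enumerate km) 0 occ
        = if misFrom seq si 0 km ≤ fuzz then occ ++ [si] else occ := by
    intro occ si
    have h0 := inner_spec seq fuzz si km h 0 0 occ
    rw [zero_add, zero_add] at h0
    exact h0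
  simp only [hcong]
  rw [PySem.List.foldl_append_ite_eq_filter]
  simp

lemma enum_map_enum {α β : Type} (h : Int × α → β) :
    ∀ (ms : List α) (s : Int),
    PySem.List.enumerate ((PySem.List.enumerate ms s).map h) s
      = (PySem.List.enumerate ms s).map (fun p => (p.1, h p)) := by
  intro ms
  induction ms with
  | nil => simp
  | cons x ms ih => intro s; simp [PySem.List.enumerate_cons, ih]

lemma foldB_spec (seq : List Char) : ∀ (cs : List Char) (t : Int) (ms : List Int),
    (PySem.List.enumerate cs t).foldl
      (fun ms jc =>
        (PySem.List.enumerate ms).map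
          (fun idp => idp.2 + (if PySem.List.pyGet? seq (idp.1 + jc.1) ≠ some jc.2 then 1 else 0)))
      ms
    = (PySem.List.enumerate ms).map (fun p => p.2 + misFrom seq p.1 t cs) := by
  intro cs
  induction cs with
  | nil =>
    intro t ms
    simp [PySem.List.enumerate_nil, misFrom, PySem.List.map_snd_enumerate]
  | cons c cs ih =>
    intro t ms
    rw [PySem.List.enumerate_cons, List.foldl_cons, ih (t + 1), enum_map_enum, List.map_map]
    apply List.map_congr_left
    intro p _
    simp only [Function.comp_apply, misFrom]
    ring

lemma enum_replicate (x : Int) : ∀ (n : Nat) (s : Int),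
    PySem.List.enumerate (List.replicate n x) s
      = (PySem.List.pyRange s (s + (n : Int)) 1).map (fun i => (i, x)) := by
  intro n
  induction n with
  | zero => intro s; simp [PySem.List.pyRange_one_eq_nil]
  | succ n ih =>
    intro s
    rw [List.replicate_succ, PySem.List.enumerate_cons, ih (s + 1)]
    have hc : s + ((n + 1 : Nat) : Int) = (s + 1) + (n : Int) := by push_cast; ring
    rw [hc, PySem.List.pyRange_one_cons (show s < (s + 1) + (n : Int) by omega)]
    simp

lemma B_char (seq km : List Char) (fuzz : Int) :
    fuzzy_occurrences_alt (String.ofList seq) (String.ofList km) fuzz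
    = (PySem.List.pyRange 0 ((seq.length : Int) - (km.length : Int) + 1) 1).filter
        (fun si => decide (misFrom seq si 0 km ≤ fuzz)) := by
  unfold fuzzy_occurrences_alt
  simp only [String.toList_ofList]
  set m : Int := (seq.length : Int) - (km.length : Int) + 1 with hm
  by_cases hpos : 0 < m
  · rw [foldB_spec, enum_replicate, zero_add, Int.toNat_of_nonneg (by omega), List.map_map]
    apply List.filter_congr
    intro i hi
    rw [PySem.List.mem_pyRange_one] at hi
    rw [PySem.List.pyGetD_map_pyRange_of_nonneg _ m i 0 hi.1 hi.2]
    simp only [Function.comp_apply, zero_add]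
  · rw [PySem.List.pyRange_one_eq_nil (by omega), List.filter_nil, List.filter_nil]

-- ===== VERDICT (by name: the statement is the Claim_ definition above) =====
theorem fuzzy_occurrences_spec : Claim_unchanged_fuzzy_occurrences := by
  intro sequence kmer fuzziness _ hnd
  have hB := B_char sequence.toList kmer.toList fuzziness
  rw [String.ofList_toList, String.ofList_toList] at hB
  by_cases hk : kmer.toList = []
  · have hkm : kmer = "" := by
      have := congrArg String.ofList hk
      rwa [String.ofList_toList] at this
    have hf : fuzziness < 0 := by
      by_contra hc
      exact hnd ⟨hkm, by omega⟩
    have hA : fuzzy_occurrences sequence kmer fuzziness = [] := by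
      unfold fuzzy_occurrences
      simp only [hk, PySem.List.enumerate_nil, fuzzyInner]
      generalize PySem.List.pyRange 0 (1 + (sequence.toList.length : Int) - ((List.nil : List Char).length : Int)) 1 = l
      induction l with
      | nil => rfl
      | cons x l ihl => rw [List.foldl_cons]; exact ihl
    rw [hA, hB, hk]
    have hfalse : ∀ si : Int, decide (misFrom sequence.toList si 0 [] ≤ fuzziness) = false := by
      intro si
      simp only [misFrom, decide_eq_false_iff_not]
      omega
    simp [hfalse]
  · unfold fuzzy_occurrences
    rw [A_char sequence.toList kmer.toList fuzziness hk, hB]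
    have harith : 1 + (sequence.toList.length : Int) - (kmer.toList.length : Int)
        = (sequence.toList.length : Int) - (kmer.toList.length : Int) + 1 := by ring
    rw [harith]

theorem fuzzy_occurrences_changed : Claim_changed_fuzzy_occurrences := by
  unfold Claim_changed_fuzzy_occurrences; decide

theorem fuzzy_occurrences_tight : Claim_exact_fuzzy_occurrences := by
  intro sequence kmer fuzziness _ hd
  obtain ⟨hkm, hf⟩ := hd
  have hk : kmer.toList = [] := by rw [hkm]; rfl
  have hA : fuzzy_occurrences sequence kmer fuzziness = [] := by
    unfold fuzzy_occurrences
    simp only [hk, PySem.List.enumerate_nil, fuzzyInner]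
    generalize PySem.List.pyRange 0 (1 + (sequence.toList.length : Int) - ((List.nil : List Char).length : Int)) 1 = l
    induction l with
    | nil => rfl
    | cons x l ihl => rw [List.foldl_cons]; exact ihl
  have hB := B_char sequence.toList kmer.toList fuzziness
  rw [String.ofList_toList, String.ofList_toList] at hB
  rw [hA, hB, hk]
  have htrue : ∀ si : Int, decide (misFrom sequence.toList si 0 [] ≤ fuzziness) = true := by
    intro si
    simp [misFrom, hf]
  rw [List.filter_congr (fun si _ => htrue si), List.filter_true]
  rw [PySem.List.pyRange_one_cons (by simp)]
  simp
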